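-- pv_equiv track=rewrite | github.com/jiawen1929/algorithm-study | 19_数学/容斥原理/高维容斥原理/能被primes中的至少一个数整除的数的个数.py | countMultiple
-- ===== SOURCE A (Python) =====
-- from math import floor, gcd
-- from typing import List
--
-- def countMultiple(upper: int, nums: List[int], unique=False) -> int:
--     """
--     [1, upper]中能被nums中的至少一个数整除的数的个数.
--     unique: 是否对结果去重.
--     """
--     m = len(nums)
--     res = 0
--     if unique:
--         for state in range(1, (1 << m)):  # 枚举被哪些数整除
--             mul = 1
--             for i in range(m):
--                 if state & (1 << i):
--                     gcd_ = gcd(mul, nums[i])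
--                     mul *= nums[i] // gcd_
--             # !奇数个元素系数为 1，偶数个元素为 -1
--             if state.bit_count() & 1:
--                 res += upper // mul
--             else:
--                 res -= upper // mul
--     else:
--         for state in range(1, (1 << m)):  # 枚举被哪些数整除
--             mul = 1
--             for i in range(m):
--                 if state & (1 << i):
--                     mul *= nums[i]
--             # !奇数个元素系数为 1，偶数个元素为 -1
--             if state.bit_count() & 1:
--                 res += upper // mul
--             else:
--                 res -= upper // mul
--     return res
-- ===== SOURCE B (Python) =====
-- from math import gcd
-- from typing import List
--
-- def countMultiple(upper: int, nums: List[int], unique=False) -> int: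
--     """
--     [1, upper]中能被nums中的至少一个数整除的数的个数.
--     unique: 是否对结果去重.
--     """
--     # Subset DP: each subset's product/lcm is obtained in O(1) from the
--     # subset without its newest element, so the whole enumeration is O(2^m)
--     # multiplications instead of O(2^m * m).
--     subs = [(1, -1)]  # (mul, coefficient) per subset; starts with the empty subset
--     if unique:
--         for a in nums:
--             subs += [(mul * (a // gcd(mul, a)), -c) for mul, c in subs]
--     else:
--         for a in nums:
--             subs += [(mul * a, -c) for mul, c in subs]
--     return sum(c * (upper // mul) for mul, c in subs[1:])
-- ===== Notes on version B (the rewrite author's own statement) =====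
-- stated objective: faster
-- what changed: B replaces A's per-subset inner loop over all m bits by a doubling subset DP: the list of (product-or-lcm, sign) pairs for all subsets is built incrementally, each subset's value obtained in O(1) from the subset without its newest element.
import Mathlib
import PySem

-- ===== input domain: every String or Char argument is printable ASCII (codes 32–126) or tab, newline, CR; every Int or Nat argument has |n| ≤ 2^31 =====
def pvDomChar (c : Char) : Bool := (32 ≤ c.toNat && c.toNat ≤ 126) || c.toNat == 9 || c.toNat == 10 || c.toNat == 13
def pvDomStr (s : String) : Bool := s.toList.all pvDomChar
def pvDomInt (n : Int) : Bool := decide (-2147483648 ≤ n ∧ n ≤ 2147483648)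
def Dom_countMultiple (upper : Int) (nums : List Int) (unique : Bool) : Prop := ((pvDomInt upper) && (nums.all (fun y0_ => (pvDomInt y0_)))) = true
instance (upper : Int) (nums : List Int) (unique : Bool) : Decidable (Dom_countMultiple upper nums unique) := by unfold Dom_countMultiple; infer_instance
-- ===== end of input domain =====

-- B replaces A's O(2^m·m) per-subset inner loop by building every subset's product/lcm
-- incrementally from the subset without its newest element (O(2^m) multiplications); faster.

-- ===== PORT A =====
-- The `state`/`i` loop counters are Nat here (the Python values are nonnegative);
-- `state & (1 << i)` is `state &&& (1 <<< i)`, `state.bit_count()` is PySem.Int.bitCount,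
-- `nums[i]` is `nums.getD i 0` (i < len(nums) always), `math.gcd` is `Int.gcd` (nonnegative).
def countMultiple (upper : Int) (nums : List Int) (unique : Bool) : Int :=
  let m := nums.length
  if unique then
    ((List.range (2 ^ m)).drop 1).foldl (fun res state =>
      let mul := (List.range m).foldl (fun mul i =>
        if state &&& (1 <<< i) ≠ 0 then
          let g : Int := Int.gcd mul (nums.getD i 0)
          mul * PySem.Int.floordiv (nums.getD i 0) g
        else mul) 1
      if PySem.Int.bitCount (state : Int) % 2 = 1 then res + PySem.Int.floordiv upper mul
      else res - PySem.Int.floordiv upper mul) 0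
  else
    ((List.range (2 ^ m)).drop 1).foldl (fun res state =>
      let mul := (List.range m).foldl (fun mul i =>
        if state &&& (1 <<< i) ≠ 0 then mul * nums.getD i 0 else mul) 1
      if PySem.Int.bitCount (state : Int) % 2 = 1 then res + PySem.Int.floordiv upper mul
      else res - PySem.Int.floordiv upper mul) 0

-- ===== PORT B =====
-- subs holds one (mul, coefficient) pair per subset, starting with the empty subset (1, -1);
-- each element doubles the list, combining it into every existing subset with the sign flipped.
def countMultiple_alt (upper : Int) (nums : List Int) (unique : Bool) : Int :=
  let subs : List (Int × Int) :=
    if unique then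
      nums.foldl (fun subs a =>
        subs ++ subs.map (fun mc => (mc.1 * PySem.Int.floordiv a (Int.gcd mc.1 a), -mc.2)))
        [((1 : Int), (-1 : Int))]
    else
      nums.foldl (fun subs a => subs ++ subs.map (fun mc => (mc.1 * a, -mc.2)))
        [((1 : Int), (-1 : Int))]
  ((subs.drop 1).map (fun mc => mc.2 * PySem.Int.floordiv upper mc.1)).sum

-- ===== PRECONDITION & SPEC =====
-- Pre_ excludes exactly the inputs with 0 in nums, on which the Python A raises
-- ZeroDivisionError (and the Python B raises it too).
def Pre_countMultiple (upper : Int) (nums : List Int) (unique : Bool) : Prop :=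
  (0 : Int) ∉ nums
instance (upper : Int) (nums : List Int) (unique : Bool) : Decidable (Pre_countMultiple upper nums unique) := by unfold Pre_countMultiple; infer_instance

def pvWitness_countMultiple : Int × List Int × Bool := (10, [2, 3], true)

def Spec_countMultiple (upper : Int) (nums : List Int) (unique : Bool) (out : Int) : Prop := out = countMultiple_alt upper nums unique
instance (upper : Int) (nums : List Int) (unique : Bool) (out : Int) : Decidable (Spec_countMultiple upper nums unique out) := by unfold Spec_countMultiple; infer_instance

-- ===== CLAIM (what is proved, stated in full; the proofs are below) =====
def Claim_equal_countMultiple : Prop := ∀ (upper : Int) (nums : List Int) (unique : Bool), Dom_countMultiple upper nums unique → Pre_countMultiple upper nums unique → Spec_countMultiple upper nums unique (countMultiple upper nums unique)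

-- ===== LEMMAS AND PROOFS =====

/-- A's inner loop, abstracted over the combining step `f`. -/
def pvMul (f : Int → Int → Int) (l : List Int) (s : Nat) : Int :=
  (List.range l.length).foldl
    (fun mul i => if s &&& (1 <<< i) ≠ 0 then f mul (l.getD i 0) else mul) 1

/-- The inclusion–exclusion coefficient of the subset encoded by `s`. -/
def pvCoef (s : Nat) : Int := if PySem.Int.bitCount (s : Int) % 2 = 1 then 1 else -1

lemma pv_band_iff (s i : Nat) : s &&& (1 <<< i) ≠ 0 ↔ s.testBit i = true := by
  rw [Nat.shiftLeft_eq, one_mul, Nat.and_two_pow]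
  cases h : s.testBit i <;> simp

lemma pv_bitCount_add (n : Nat) : ∀ s : Nat, s < 2 ^ n →
    PySem.Int.bitCount ((2 ^ n + s : Nat) : Int) = PySem.Int.bitCount ((s : Nat) : Int) + 1 := by
  induction n with
  | zero =>
      intro s hs
      interval_cases s
      decide
  | succ n ih =>
      intro s hs
      have h2 : (2 : Nat) ^ (n + 1) = 2 ^ n + 2 ^ n := by rw [pow_succ]; omega
      have hkey := PySem.Int.bitCount_natCast (m := 2 ^ (n + 1) + s)
        (by have := Nat.two_pow_pos (n + 1); omega)
      have hdiv : (2 ^ (n + 1) + s) / 2 = 2 ^ n + s / 2 := by omega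
      have hmod : (2 ^ (n + 1) + s) % 2 = s % 2 := by omega
      have _hh := h2
      rw [hkey, hdiv, hmod, ih (s / 2) (by omega)]
      rcases Nat.eq_zero_or_pos s with rfl | hs0
      · simp
      · rw [PySem.Int.bitCount_natCast hs0]; omega

lemma pv_coef_flip (n s : Nat) (h : s < 2 ^ n) : pvCoef (2 ^ n + s) = -pvCoef s := by
  unfold pvCoef
  rw [pv_bitCount_add n s h]
  by_cases hb : PySem.Int.bitCount ((s : Nat) : Int) % 2 = 1
  · rw [if_neg (by omega), if_pos hb]
  · rw [if_pos (by omega), if_neg hb]; norm_num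

lemma pv_mul_append_low (f : Int → Int → Int) (l : List Int) (a : Int) (s : Nat)
    (h : s < 2 ^ l.length) : pvMul f (l ++ [a]) s = pvMul f l s := by
  unfold pvMul
  have hlen : (l ++ [a]).length = l.length + 1 := by simp
  rw [hlen, List.range_succ, List.foldl_append, List.foldl_cons, List.foldl_nil]
  rw [if_neg (by rw [pv_band_iff]; simp [Nat.testBit_lt_two_pow h])]
  exact PySem.List.foldl_congr_mem _ _ _ _ (fun acc i hi => by
    rw [List.getD_append _ _ _ _ (List.mem_range.mp hi)])

lemma pv_band_add (n s i : Nat) (hi : i < n) :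
    (2 ^ n + s) &&& (1 <<< i) = s &&& (1 <<< i) := by
  rw [Nat.shiftLeft_eq, one_mul, Nat.and_two_pow, Nat.and_two_pow,
    Nat.testBit_two_pow_add_gt hi]

lemma pv_mul_append_high (f : Int → Int → Int) (l : List Int) (a : Int) (s : Nat)
    (h : s < 2 ^ l.length) : pvMul f (l ++ [a]) (2 ^ l.length + s) = f (pvMul f l s) a := by
  unfold pvMul
  have hlen : (l ++ [a]).length = l.length + 1 := by simp
  rw [hlen, List.range_succ, List.foldl_append, List.foldl_cons, List.foldl_nil]
  rw [if_pos (by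
    rw [pv_band_iff, Nat.testBit_two_pow_add_eq, Nat.testBit_lt_two_pow h]; rfl)]
  rw [List.getD_append_right _ _ _ _ (le_refl _), Nat.sub_self]
  congr 1
  exact PySem.List.foldl_congr_mem _ _ _ _ (fun acc i hi => by
    have hi' := List.mem_range.mp hi
    rw [List.getD_append _ _ _ _ hi', pv_band_add l.length s i hi'])

/-- B's doubling loop produces exactly (pvMul, pvCoef) indexed by subset code, in order. -/
lemma pv_subs_eq (f : Int → Int → Int) (l : List Int) :
    l.foldl (fun subs a => subs ++ subs.map (fun mc => (f mc.1 a, -mc.2)))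
      [((1 : Int), (-1 : Int))]
    = (List.range (2 ^ l.length)).map (fun s => (pvMul f l s, pvCoef s)) := by
  induction l using List.reverseRecOn with
  | nil =>
      have : pvCoef 0 = -1 := by decide
      simp [pvMul, this]
  | append_singleton l a ih =>
      rw [List.foldl_append, List.foldl_cons, List.foldl_nil, ih, List.map_map]
      have hlen : (l ++ [a]).length = l.length + 1 := by simp
      have h2 : (2 : Nat) ^ (l.length + 1) = 2 ^ l.length + 2 ^ l.length := by
        rw [pow_succ]; omega
      rw [hlen, h2, List.range_add, List.map_append, List.map_map]
      congr 1
      · exact List.map_congr_left (fun s hs => by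
          rw [pv_mul_append_low f l a s (List.mem_range.mp hs)])
      · exact List.map_congr_left (fun s hs => by
          have hs' := List.mem_range.mp hs
          simp only [Function.comp_apply]
          rw [pv_mul_append_high f l a s hs', pv_coef_flip _ s hs'])

/-- A's outer loop as a sum of signed terms over the subset codes. -/
lemma pv_foldl_signed (upper : Int) (g : Nat → Int) (L : List Nat) (c : Int) :
    L.foldl (fun res (s : Nat) =>
        if PySem.Int.bitCount (s : Int) % 2 = 1 then res + PySem.Int.floordiv upper (g s)
        else res - PySem.Int.floordiv upper (g s)) c
    = c + (L.map (fun s => pvCoef s * PySem.Int.floordiv upper (g s))).sum := by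
  rw [← PySem.List.foldl_add L (fun s => pvCoef s * PySem.Int.floordiv upper (g s)) c]
  exact PySem.List.foldl_congr_mem _ _ _ _ (fun acc s _ => by
    unfold pvCoef; split_ifs <;> ring)

/-- Both programs, for a given step `f`, reduce to the same signed sum. -/
lemma pv_both (upper : Int) (l : List Int) (f : Int → Int → Int) :
    ((List.range (2 ^ l.length)).drop 1).foldl (fun res (s : Nat) =>
        if PySem.Int.bitCount (s : Int) % 2 = 1 then res + PySem.Int.floordiv upper (pvMul f l s)
        else res - PySem.Int.floordiv upper (pvMul f l s)) 0
    = ((((List.range (2 ^ l.length)).map (fun s => (pvMul f l s, pvCoef s))).drop 1).map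
        (fun mc : Int × Int => mc.2 * PySem.Int.floordiv upper mc.1)).sum := by
  rw [pv_foldl_signed, ← List.map_drop, List.map_map, zero_add]
  rfl

-- ===== VERDICT (by name: the statement is the Claim_ definition above) =====
theorem countMultiple_spec : Claim_equal_countMultiple := by
  intro upper nums unique _hdom _hpre
  unfold Spec_countMultiple countMultiple countMultiple_alt
  cases unique
  · rw [if_neg (by simp), if_neg (by simp),
      pv_subs_eq (fun mul a => mul * a) nums]
    exact pv_both upper nums (fun mul a => mul * a)
  · rw [if_pos rfl, if_pos rfl,
      pv_subs_eq (fun mul a => mul * PySem.Int.floordiv a (Int.gcd mul a)) nums]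
    exact pv_both upper nums (fun mul a => mul * PySem.Int.floordiv a (Int.gcd mul a))
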